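-- pv_equiv track=rewrite | github.com/StackOps/stackops-agent | utils.py | bits2netmask
-- ===== SOURCE A (Python) =====
-- def bits2netmask(bits):
--     bits= int(bits)
--     parts = []
--     while bits > 0:
--         if bits > 7:
--             parts.append('255')
--         else:
--             parts.append(str((255^2**(8-bits))+1))
--         bits -= 8
--     if len(parts) < 4:
--         parts.extend(['0']*(4-len(parts)))
--     return '.'.join(parts)
-- ===== SOURCE B (Python) =====
-- def bits2netmask(bits):
--     bits = int(bits)
--     n = max((bits + 7) // 8, 0)
--     mask = ((1 << bits) - 1) << (n * 8 - bits) if bits > 0 else 0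
--     octets = [(mask >> (8 * (n - 1 - i))) & 255 for i in range(n)]
--     octets.extend([0] * (4 - len(octets)))
--     return '.'.join(str(o) for o in octets)
-- ===== Notes on version B (the rewrite author's own statement) =====
-- stated objective: alternative
-- what changed: Replaces A's per-octet while-loop (XOR trick per remaining bit count) by building the whole netmask as one integer ((1<<bits)-1)<<pad and extracting each octet with shift-and-AND over a range comprehension.
import Mathlib
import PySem

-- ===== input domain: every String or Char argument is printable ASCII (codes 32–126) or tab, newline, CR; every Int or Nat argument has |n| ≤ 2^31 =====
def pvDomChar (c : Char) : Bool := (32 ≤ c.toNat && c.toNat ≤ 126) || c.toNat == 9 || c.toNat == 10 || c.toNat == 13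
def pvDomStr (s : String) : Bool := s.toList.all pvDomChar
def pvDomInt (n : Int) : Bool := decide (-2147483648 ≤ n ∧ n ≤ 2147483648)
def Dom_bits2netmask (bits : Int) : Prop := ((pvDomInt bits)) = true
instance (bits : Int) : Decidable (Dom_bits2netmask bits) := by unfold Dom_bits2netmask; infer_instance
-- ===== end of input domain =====

-- B replaces A's per-octet XOR loop by building the whole mask as one big integer
-- (((1 << bits) - 1) << pad) and extracting each octet with shift-and-AND (objective: alternative).

-- ===== PORT A =====
-- the 'while bits > 0' loop of A, collecting parts
def bits2netmaskLoop (bits : Int) : List String :=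
  if _h : bits > 0 then
    (if bits > 7 then "255"
     else PySem.Int.toStr ((PySem.Int.bxor 255 (2 ^ (8 - bits).toNat)) + 1)) :: bits2netmaskLoop (bits - 8)
  else []
termination_by bits.toNat
decreasing_by omega

def bits2netmask (bits : Int) : String :=
  let parts := bits2netmaskLoop bits
  let parts := if parts.length < 4 then parts ++ List.replicate (4 - parts.length) "0" else parts
  PySem.Str.join "." parts

-- ===== PORT B =====
def bits2netmask_alt (bits : Int) : String :=
  let n : Int := max (PySem.Int.floordiv (bits + 7) 8) 0
  -- Python '<<'/'>>' on nonnegative shift amounts; the guards make the .toNat exact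
  let mask : Int := if bits > 0 then ((1 <<< bits.toNat) - 1) <<< (n * 8 - bits).toNat else 0
  let octets : List Int :=
    (PySem.List.pyRange 0 n 1).map (fun i => PySem.Int.band (mask >>> (8 * (n - 1 - i)).toNat) 255)
  let octets := octets ++ List.replicate (4 - (octets.length : Int)).toNat 0
  PySem.Str.join "." (octets.map PySem.Int.toStr)

-- ===== PRECONDITION & SPEC =====
def Spec_bits2netmask (bits : Int) (out : String) : Prop := out = bits2netmask_alt bits
instance (bits : Int) (out : String) : Decidable (Spec_bits2netmask bits out) := by unfold Spec_bits2netmask; infer_instance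

-- ===== CLAIM (what is proved, stated in full; the proofs are below) =====
def Claim_equal_bits2netmask : Prop := ∀ (bits : Int), Dom_bits2netmask bits → Spec_bits2netmask bits (bits2netmask bits)




-- ===== LEMMAS AND PROOFS =====

-- the value of the k-th octet, as a plain formula (255 for full octets, 256 - 2^pad for the last)
def pvMval (b i : ℕ) : ℕ := if 8*(i+1) ≤ b then 255 else 256 - 2^(8*((b+7)/8) - b)

def pvMlist (b : ℕ) : List ℕ := (List.range ((b+7)/8)).map (pvMval b)

-- core arithmetic: extracting octet i of the mask (2^b - 1) * 2^pad by shift/mod gives pvMval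
theorem pv_octet_val (b i : ℕ) (hb : 1 ≤ b) (hi : i < (b+7)/8) :
    ((2^b - 1) * 2^(8*((b+7)/8) - b)) / 2^(8*(((b+7)/8) - 1 - i)) % 256 = pvMval b i := by
  unfold pvMval
  set n := (b+7)/8 with hn
  have hn1 : 1 ≤ n := by omega
  have hbn : b ≤ 8*n := by omega
  have hp8 : 8*n - b < 8 := by omega
  set p := 8*n - b with hpdef
  set s := 8*(n-1-i) with hsdef
  have hmask : (2^b - 1) * 2^p = 2^(8*n) - 2^p := by
    rw [Nat.sub_mul, one_mul, ← pow_add]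
    congr 2
    omega
  rw [hmask]
  by_cases h : 8*(i+1) ≤ b
  · rw [if_pos h]
    have hsp : p ≤ s := by omega
    have hs8n : s ≤ 8*n := by omega
    have h1 : 2^s * (2^(8*n-s) - 1) = 2^(8*n) - 2^s := by
      rw [Nat.mul_sub, mul_one, ← pow_add]
      congr 2
      omega
    have hcc : 2^p ≤ 2^s := Nat.pow_le_pow_right (by norm_num) hsp
    have hcc2 : 2^s ≤ 2^(8*n) := Nat.pow_le_pow_right (by norm_num) hs8n
    have hone : (1:ℕ) ≤ 2^p := Nat.one_le_two_pow
    have e : 2^(8*n) - 2^p = 2^s * (2^(8*n-s) - 1) + (2^s - 2^p) := by omega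
    rw [e, Nat.mul_add_div (by positivity), Nat.div_eq_of_lt (by omega), Nat.add_zero]
    have h8 : 8*n - s = 8*(i+1) := by omega
    rw [h8, show 8*(i+1) = 8*i+8 by ring, pow_add]
    have hm : 1 ≤ 2^(8*i) := Nat.one_le_two_pow
    norm_num
    omega
  · rw [if_neg h]
    have hs0 : s = 0 := by omega
    rw [hs0, pow_zero, Nat.div_one]
    have h2 : 2^(8*n) = 2^(8*(n-1)) * 256 := by
      rw [show 8*n = 8*(n-1)+8 by omega, pow_add]
      norm_num
    have h3 : 2^p ≤ 128 := by
      calc 2^p ≤ 2^7 := Nat.pow_le_pow_right (by norm_num) (by omega)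
        _ = 128 := by norm_num
    have hm : 1 ≤ 2^(8*(n-1)) := Nat.one_le_two_pow
    have hone : (1:ℕ) ≤ 2^p := Nat.one_le_two_pow
    rw [h2]
    omega

-- shifting the bit count down by one octet shifts pvMval's index
theorem pv_mval_shift (b i : ℕ) (h9 : 9 ≤ b) : pvMval b (i+1) = pvMval (b-8) i := by
  unfold pvMval
  have he : 8*((b+7)/8) - b = 8*((b-8+7)/8) - (b-8) := by omega
  have hiff : 8*(i+1+1) ≤ b ↔ 8*(i+1) ≤ b-8 := by omega
  rw [he, if_congr hiff rfl rfl]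

-- A's while-loop produces exactly the decimal strings of pvMlist
theorem pv_loop_eq (b : ℕ) (hb : 1 ≤ b) :
    bits2netmaskLoop (b:ℤ) = (pvMlist b).map (fun v : ℕ => PySem.Int.toStr ((v:ℕ):ℤ)) := by
  induction b using Nat.strong_induction_on with
  | _ b ih =>
    by_cases hb8 : b ≤ 8
    · interval_cases b <;> simp [bits2netmaskLoop, pvMlist, pvMval] <;> decide
    · have h9 : 9 ≤ b := by omega
      rw [bits2netmaskLoop]
      rw [dif_pos (by exact_mod_cast Nat.lt_of_lt_of_le (by norm_num) h9 : (0:ℤ) < (b:ℤ))]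
      rw [if_pos (by exact_mod_cast Nat.lt_of_lt_of_le (by norm_num) h9 : (7:ℤ) < (b:ℤ))]
      have hcast : (b:ℤ) - 8 = ((b - 8 : ℕ) : ℤ) := by omega
      rw [hcast, ih (b-8) (by omega) (by omega)]
      unfold pvMlist
      rw [show (b+7)/8 = (b-8+7)/8 + 1 by omega, List.range_succ_eq_map,
        List.map_cons, List.map_cons]
      congr 1
      · rw [show pvMval b 0 = 255 by unfold pvMval; rw [if_pos (by omega)]]
        decide
      · rw [List.map_map, List.map_map, List.map_map]
        exact (List.map_congr_left (fun i _ => by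
          simp only [Function.comp_apply, Nat.succ_eq_add_one]
          rw [pv_mval_shift b i h9])).symm

-- B's octet comprehension produces exactly pvMlist (as integers)
theorem pv_octets_eq (b : ℕ) (hb : 1 ≤ b) :
    (PySem.List.pyRange 0 (((b+7)/8 : ℕ) : ℤ) 1).map
      (fun i : ℤ => PySem.Int.band
        (((((1 <<< b - 1) <<< (8*((b+7)/8) - b) : ℕ)) : ℤ) >>> (8 * (((((b+7)/8 : ℕ)) : ℤ) - 1 - i)).toNat) 255)
      = (pvMlist b).map (fun v : ℕ => ((v:ℕ):ℤ)) := by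
  have hNb : b ≤ 8*((b+7)/8) := by omega
  have hmask : (1 <<< b - 1) <<< (8*((b+7)/8) - b) = (2^b - 1) * 2^(8*((b+7)/8) - b) := by
    rw [Nat.shiftLeft_eq, Nat.shiftLeft_eq, one_mul]
  rw [hmask, PySem.List.pyRange_one]
  simp only [sub_zero, Int.toNat_natCast, List.map_map]
  unfold pvMlist
  rw [List.map_map]
  refine List.map_congr_left (fun k hk => ?_)
  have hkN : k < (b+7)/8 := List.mem_range.mp hk
  simp only [Function.comp_apply, zero_add]
  have hs : (8 * (((((b+7)/8 : ℕ)):ℤ) - 1 - (k:ℤ))).toNat = 8*(((b+7)/8) - 1 - k) := by omega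
  rw [hs]
  rw [show ((((2^b - 1) * 2^(8*((b+7)/8) - b) : ℕ)):ℤ) >>> (8*(((b+7)/8) - 1 - k))
      = ((((2^b - 1) * 2^(8*((b+7)/8) - b)) >>> (8*(((b+7)/8) - 1 - k)) : ℕ) : ℤ) by
    simp [Int.natCast_shiftRight]]
  rw [Nat.shiftRight_eq_div_pow]
  rw [show (255:ℤ) = ((255:ℕ):ℤ) by norm_num, PySem.Int.band_natCast]
  rw [show ((2^b - 1) * 2^(8*((b+7)/8) - b) / 2^(8*(((b+7)/8) - 1 - k))) &&& 255
      = (2^b - 1) * 2^(8*((b+7)/8) - b) / 2^(8*(((b+7)/8) - 1 - k)) % 256 by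
    have := Nat.and_two_pow_sub_one_eq_mod ((2^b - 1) * 2^(8*((b+7)/8) - b) / 2^(8*(((b+7)/8) - 1 - k))) 8
    norm_num at this
    omega]
  exact_mod_cast congrArg (fun x : ℕ => ((x:ℕ):ℤ)) (pv_octet_val b k hb hkN)

-- ===== VERDICT (by name: the statement is the Claim_ definition above) =====
theorem bits2netmask_spec : Claim_equal_bits2netmask := by
  intro bits _
  unfold Spec_bits2netmask bits2netmask bits2netmask_alt
  by_cases hpos : bits > 0
  · -- positive case: bits = ↑b with 1 ≤ b
    obtain ⟨b, rfl⟩ : ∃ b : ℕ, bits = (b:ℤ) := ⟨bits.toNat, by omega⟩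
    have hb : 1 ≤ b := by exact_mod_cast hpos
    have hNb : b ≤ 8*((b+7)/8) := by omega
    have hn : max (PySem.Int.floordiv ((b:ℤ)+7) 8) 0 = ((((b+7)/8 : ℕ)):ℤ) := by
      rw [show ((b:ℤ)+7) = ((b+7:ℕ):ℤ) by push_cast; ring]
      rw [show PySem.Int.floordiv ((b+7:ℕ):ℤ) 8 = (((((b+7)/8 : ℕ)):ℤ)) by
        exact_mod_cast PySem.Int.floordiv_natCast (b+7) 8]
      exact max_eq_left (by positivity)
    have htn : ((b:ℤ)).toNat = b := by omega
    have hpad : (((((b+7)/8 : ℕ)):ℤ) * 8 - (b:ℤ)).toNat = 8*((b+7)/8) - b := by omega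
    simp only [hn, if_pos hpos, htn, hpad]
    rw [pv_octets_eq b hb, pv_loop_eq b hb]
    have hlenA : ((pvMlist b).map (fun v : ℕ => PySem.Int.toStr ((v:ℕ):ℤ))).length = (b+7)/8 := by
      simp [pvMlist]
    have hlenB : ((pvMlist b).map (fun v : ℕ => ((v:ℕ):ℤ))).length = (b+7)/8 := by
      simp [pvMlist]
    rw [hlenA, hlenB]
    by_cases h4 : (b+7)/8 < 4
    · rw [if_pos (by exact_mod_cast h4)]
      rw [show ((4:ℤ) - ((((b+7)/8 : ℕ)):ℤ)).toNat = 4 - (b+7)/8 by omega]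
      congr 1
      rw [List.map_append, List.map_map, List.map_replicate]
      congr 1
    · rw [if_neg (by exact_mod_cast h4)]
      rw [show ((4:ℤ) - ((((b+7)/8 : ℕ)):ℤ)).toNat = 0 by omega]
      rw [List.replicate_zero, List.append_nil, List.map_map]
      rfl
  · -- bits ≤ 0: loop is empty, n = 0, both sides are "0.0.0.0"
    have hloop : bits2netmaskLoop bits = [] := by
      rw [bits2netmaskLoop, dif_neg hpos]
    have hfd : PySem.Int.floordiv (bits+7) 8 < 1 := by
      rw [PySem.Int.floordiv_lt_iff_lt_mul (by norm_num)]
      omega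
    have hn : max (PySem.Int.floordiv (bits+7) 8) 0 = 0 := max_eq_right (by omega)
    simp only [hloop, hn, if_neg hpos, PySem.List.pyRange_zero]
    decide
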